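-- pv_equiv track=rewrite | github.com/jonwashburn/rs-website | scripts/use_real_cc_images.py | get_images_for_topic
-- ===== SOURCE A (Python) =====
-- def get_images_for_topic(title, category):
--     """Select appropriate CC images based on topic"""
--     title_lower = title.lower()
--     category_lower = category.lower() if category else ""
--
--     # Match images to topics
--     if any(term in title_lower for term in ["big bang", "cosmic", "universe", "hubble"]):
--         return ["cosmos_cmb", "cosmos_hubble", "cosmos_galaxy"]
--     elif any(term in title_lower for term in ["quantum", "particle", "electron", "photon"]):
--         return ["quantum_orbital", "quantum_interference", "quantum_entanglement"]
--     elif any(term in title_lower for term in ["spacetime", "gravity", "relativity", "curvature"]):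
--         return ["spacetime_curvature", "spacetime_diagram", "spacetime_gravity"]
--     elif any(term in title_lower for term in ["golden", "ratio", "fractal", "topology"]):
--         return ["math_golden", "math_fractal", "math_topology"]
--     elif "cosmology" in category_lower:
--         return ["cosmos_galaxy", "cosmos_cmb", "cosmos_hubble"]
--     elif "quantum" in category_lower:
--         return ["quantum_orbital", "quantum_interference", "physics_atom"]
--     else:
--         # Default physics images
--         return ["physics_atom", "physics_wave", "physics_field"]
-- ===== SOURCE B (Python) =====
-- # Flat keyword->priority map; exhaustively scan the title for ALL matching
-- # keywords and take the minimum priority, then index one image table.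
-- _KEYWORD_PRIORITY = {
--     "big bang": 0, "cosmic": 0, "universe": 0, "hubble": 0,
--     "quantum": 1, "particle": 1, "electron": 1, "photon": 1,
--     "spacetime": 2, "gravity": 2, "relativity": 2, "curvature": 2,
--     "golden": 3, "ratio": 3, "fractal": 3, "topology": 3,
-- }
--
-- _IMAGES = [
--     ["cosmos_cmb", "cosmos_hubble", "cosmos_galaxy"],
--     ["quantum_orbital", "quantum_interference", "quantum_entanglement"],
--     ["spacetime_curvature", "spacetime_diagram", "spacetime_gravity"],
--     ["math_golden", "math_fractal", "math_topology"],
--     ["cosmos_galaxy", "cosmos_cmb", "cosmos_hubble"],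
--     ["quantum_orbital", "quantum_interference", "physics_atom"],
--     ["physics_atom", "physics_wave", "physics_field"],
-- ]
--
--
-- def get_images_for_topic(title, category):
--     """Select appropriate CC images based on topic"""
--     title_lower = title.lower()
--     best = min((p for kw, p in _KEYWORD_PRIORITY.items() if kw in title_lower),
--                default=None)
--     if best is None:
--         category_lower = (category or "").lower()
--         best = 4 if "cosmology" in category_lower else 5 if "quantum" in category_lower else 6
--     return list(_IMAGES[best])
-- ===== Notes on version B (the rewrite author's own statement) =====
-- stated objective: alternative
-- what changed: A's ordered if/elif ladder with early returns is replaced by a flat keyword->priority map scanned exhaustively: B collects ALL matching keywords, takes the minimum priority (no early exit, no per-branch returns), falls back to category-derived priorities 4/5/6, and indexes a single image table; correct because within a group any match yields the same list and group order equals priority order.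
import Mathlib
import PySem

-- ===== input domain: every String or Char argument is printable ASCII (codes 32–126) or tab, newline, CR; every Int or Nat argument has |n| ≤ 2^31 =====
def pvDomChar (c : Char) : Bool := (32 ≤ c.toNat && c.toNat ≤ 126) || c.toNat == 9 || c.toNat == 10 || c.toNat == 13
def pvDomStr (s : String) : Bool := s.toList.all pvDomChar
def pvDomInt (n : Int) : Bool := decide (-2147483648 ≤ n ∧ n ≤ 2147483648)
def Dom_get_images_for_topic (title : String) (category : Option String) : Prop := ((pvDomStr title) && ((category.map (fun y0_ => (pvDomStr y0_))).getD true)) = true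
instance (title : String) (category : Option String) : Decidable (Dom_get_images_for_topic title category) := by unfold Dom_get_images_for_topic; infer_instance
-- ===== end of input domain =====

-- B replaces A's ordered elif ladder by a flat keyword->priority map scanned exhaustively,
-- taking the minimum matching priority and indexing one image table (alternative; same cost).


-- ===== PORT A =====
def get_images_for_topic (title : String) (category : Option String) : List String :=
  let title_lower := PySem.Str.lower title
  let category_lower := match category with
    | none => ""
    | some c => if c = "" then "" else PySem.Str.lower c
  if ["big bang", "cosmic", "universe", "hubble"].any (fun term => PySem.Str.isIn term title_lower) then
    ["cosmos_cmb", "cosmos_hubble", "cosmos_galaxy"]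
  else if ["quantum", "particle", "electron", "photon"].any (fun term => PySem.Str.isIn term title_lower) then
    ["quantum_orbital", "quantum_interference", "quantum_entanglement"]
  else if ["spacetime", "gravity", "relativity", "curvature"].any (fun term => PySem.Str.isIn term title_lower) then
    ["spacetime_curvature", "spacetime_diagram", "spacetime_gravity"]
  else if ["golden", "ratio", "fractal", "topology"].any (fun term => PySem.Str.isIn term title_lower) then
    ["math_golden", "math_fractal", "math_topology"]
  else if PySem.Str.isIn "cosmology" category_lower then
    ["cosmos_galaxy", "cosmos_cmb", "cosmos_hubble"]
  else if PySem.Str.isIn "quantum" category_lower then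
    ["quantum_orbital", "quantum_interference", "physics_atom"]
  else
    ["physics_atom", "physics_wave", "physics_field"]

-- ===== PORT B =====
-- Source B's _KEYWORD_PRIORITY dict, in insertion order
def giftKeywordPriority : List (String × Nat) :=
  [ ("big bang", 0), ("cosmic", 0), ("universe", 0), ("hubble", 0),
    ("quantum", 1), ("particle", 1), ("electron", 1), ("photon", 1),
    ("spacetime", 2), ("gravity", 2), ("relativity", 2), ("curvature", 2),
    ("golden", 3), ("ratio", 3), ("fractal", 3), ("topology", 3) ]

-- Source B's _IMAGES table
def giftImages : List (List String) :=
  [ ["cosmos_cmb", "cosmos_hubble", "cosmos_galaxy"],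
    ["quantum_orbital", "quantum_interference", "quantum_entanglement"],
    ["spacetime_curvature", "spacetime_diagram", "spacetime_gravity"],
    ["math_golden", "math_fractal", "math_topology"],
    ["cosmos_galaxy", "cosmos_cmb", "cosmos_hubble"],
    ["quantum_orbital", "quantum_interference", "physics_atom"],
    ["physics_atom", "physics_wave", "physics_field"] ]

-- one step of Python's min(...) over the filtered generator
def giftStep (title_lower : String) (acc : Option Nat) (p : String × Nat) : Option Nat :=
  if PySem.Str.isIn p.1 title_lower then
    match acc with
    | none => some p.2
    | some b => some (min b p.2)
  else acc

-- min((p for kw, p in _KEYWORD_PRIORITY.items() if kw in title_lower), default=None)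
def giftBest (title_lower : String) : Option Nat :=
  giftKeywordPriority.foldl (giftStep title_lower) none

def get_images_for_topic_alt (title : String) (category : Option String) : List String :=
  let title_lower := PySem.Str.lower title
  let best : Nat :=
    match giftBest title_lower with
    | some b => b
    | none =>
      let category_lower := PySem.Str.lower (category.getD "")
      if PySem.Str.isIn "cosmology" category_lower then 4
      else if PySem.Str.isIn "quantum" category_lower then 5
      else 6
  (giftImages.getD best [])

-- ===== PRECONDITION & SPEC =====
def Spec_get_images_for_topic (title : String) (category : Option String) (out : List String) : Prop := out = get_images_for_topic_alt title category
instance (title : String) (category : Option String) (out : List String) : Decidable (Spec_get_images_for_topic title category out) := by unfold Spec_get_images_for_topic; infer_instance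

-- ===== CLAIM (what is proved, stated in full; the proofs are below) =====
def Claim_equal_get_images_for_topic : Prop := ∀ (title : String) (category : Option String), Dom_get_images_for_topic title category → Spec_get_images_for_topic title category (get_images_for_topic title category)

-- ===== LEMMAS AND PROOFS =====

-- once the running minimum is ≤ every remaining priority, the fold keeps it
theorem giftFold_some (tl : String) (j : Nat) (l : List (String × Nat))
    (h : ∀ p ∈ l, j ≤ p.2) : l.foldl (giftStep tl) (some j) = some j := by
  induction l with
  | nil => rfl
  | cons p rest ih =>
    have hj : j ≤ p.2 := h p (List.mem_cons_self ..)
    have hrest : ∀ q ∈ rest, j ≤ q.2 := fun q hq => h q (List.mem_cons_of_mem _ hq)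
    simp only [List.foldl_cons, giftStep]
    split
    · rw [min_eq_left hj]; exact ih hrest
    · exact ih hrest

-- a group of four keywords sharing priority i, folded from none
theorem giftFold_group (tl a b c d : String) (i : Nat) (acc : List (String × Nat)) :
    List.foldl (giftStep tl) none ([(a, i), (b, i), (c, i), (d, i)] ++ acc) =
      (if PySem.Str.isIn a tl || PySem.Str.isIn b tl || PySem.Str.isIn c tl || PySem.Str.isIn d tl
       then List.foldl (giftStep tl) (some i) acc
       else List.foldl (giftStep tl) none acc) := by
  by_cases ha : PySem.Chars.isIn a.toList tl.toList <;>
    by_cases hb : PySem.Chars.isIn b.toList tl.toList <;>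
      by_cases hc : PySem.Chars.isIn c.toList tl.toList <;>
        by_cases hd : PySem.Chars.isIn d.toList tl.toList <;>
          simp [giftStep, PySem.Str.isIn, ha, hb, hc, hd, min_self]

theorem giftBest_eq (tl : String) :
    giftBest tl =
      (if PySem.Str.isIn "big bang" tl || PySem.Str.isIn "cosmic" tl || PySem.Str.isIn "universe" tl || PySem.Str.isIn "hubble" tl then some 0
       else if PySem.Str.isIn "quantum" tl || PySem.Str.isIn "particle" tl || PySem.Str.isIn "electron" tl || PySem.Str.isIn "photon" tl then some 1
       else if PySem.Str.isIn "spacetime" tl || PySem.Str.isIn "gravity" tl || PySem.Str.isIn "relativity" tl || PySem.Str.isIn "curvature" tl then some 2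
       else if PySem.Str.isIn "golden" tl || PySem.Str.isIn "ratio" tl || PySem.Str.isIn "fractal" tl || PySem.Str.isIn "topology" tl then some 3
       else none) := by
  unfold giftBest giftKeywordPriority
  rw [show ([("big bang", 0), ("cosmic", 0), ("universe", 0), ("hubble", 0),
    ("quantum", 1), ("particle", 1), ("electron", 1), ("photon", 1),
    ("spacetime", 2), ("gravity", 2), ("relativity", 2), ("curvature", 2),
    ("golden", 3), ("ratio", 3), ("fractal", 3), ("topology", 3)] : List (String × Nat)) =
    [("big bang", 0), ("cosmic", 0), ("universe", 0), ("hubble", 0)] ++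
    ([("quantum", 1), ("particle", 1), ("electron", 1), ("photon", 1)] ++
    ([("spacetime", 2), ("gravity", 2), ("relativity", 2), ("curvature", 2)] ++
    ([("golden", 3), ("ratio", 3), ("fractal", 3), ("topology", 3)] ++ []))) from rfl]
  rw [giftFold_group]
  split
  · exact giftFold_some tl 0 _ (by decide)
  · rw [giftFold_group]
    split
    · exact giftFold_some tl 1 _ (by decide)
    · rw [giftFold_group]
      split
      · exact giftFold_some tl 2 _ (by decide)
      · rw [giftFold_group]
        split
        · exact giftFold_some tl 3 _ (by decide)
        · rfl

-- ===== VERDICT (by name: the statement is the Claim_ definition above) =====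
set_option maxHeartbeats 1000000 in
theorem get_images_for_topic_spec : Claim_equal_get_images_for_topic := by
  intro title category _
  have h0 : PySem.Str.lower "" = "" := rfl
  unfold Spec_get_images_for_topic get_images_for_topic get_images_for_topic_alt
  simp only [giftBest_eq, List.any_cons, List.any_nil, Bool.or_false]
  cases category with
  | none =>
    simp only [Option.getD, h0]
    split_ifs <;> simp_all [giftImages]
  | some c =>
    by_cases hc : c = "" <;>
      simp only [hc, if_true, if_false, Option.getD, h0] <;>
        split_ifs <;> simp_all [giftImages]
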